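-- pv_equiv track=rewrite | github.com/MrBrantCode/unitest_baseline | mut_generate/mist_train_cf/cf_88496/solution.py | find_longest_string
-- ===== SOURCE A (Python) =====
-- class EmptyListException(Exception):
--     pass
--
-- def find_longest_string(strings):
--     if not strings:
--         raise EmptyListException("List is empty.")
--
--     longest_strings = []
--     max_sum = float('-inf')
--
--     for string in strings:
--         string_sum = sum(ord(char) for char in string)
--         if string_sum > max_sum:
--             longest_strings = [string]
--             max_sum = string_sum
--         elif string_sum == max_sum:
--             longest_strings.append(string)
--
--     if not longest_strings:
--         raise EmptyListException("List contains only empty strings.")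
--
--     return longest_strings
-- ===== SOURCE B (Python) =====
-- class EmptyListException(Exception):
--     pass
--
-- def find_longest_string(strings):
--     if not strings:
--         raise EmptyListException("List is empty.")
--     sums = [sum(ord(c) for c in s) for s in strings]
--     max_sum = max(sums)
--     return [s for s, t in zip(strings, sums) if t == max_sum]
-- ===== Notes on version B (the rewrite author's own statement) =====
-- stated objective: alternative
-- what changed: Replaced the single-pass running-max accumulator (reset list on new max, append on tie) by a two-pass decomposition: build a table of ord-sums, take its max, then filter the strings whose sum equals it.
import Mathlib
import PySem

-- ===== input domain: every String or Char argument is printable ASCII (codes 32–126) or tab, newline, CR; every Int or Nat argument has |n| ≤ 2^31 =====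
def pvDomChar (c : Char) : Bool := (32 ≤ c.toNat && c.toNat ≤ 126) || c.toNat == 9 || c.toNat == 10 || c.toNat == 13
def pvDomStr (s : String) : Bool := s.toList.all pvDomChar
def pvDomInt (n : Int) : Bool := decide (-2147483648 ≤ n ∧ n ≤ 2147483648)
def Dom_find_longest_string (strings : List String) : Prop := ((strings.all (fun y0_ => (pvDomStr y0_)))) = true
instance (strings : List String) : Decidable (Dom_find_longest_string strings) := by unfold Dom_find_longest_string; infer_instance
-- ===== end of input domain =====

-- B replaces A's single-pass running-max accumulator by a two-pass sums-table + filter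
-- decomposition (objective: alternative, same cost); equivalence proved on nonempty input
-- (A raises EmptyListException on []).

-- ===== PORT A =====
-- sum(ord(char) for char in string)
def pvOrdSum (s : String) : Int := (s.toList.map (fun c => (c.toNat : Int))).sum

-- loop body; max_sum : Option Int models float('-inf') as none (any sum compares greater)
def pvAStep (st : List String × Option Int) (s : String) : List String × Option Int :=
  let t := pvOrdSum s
  match st.2 with
  | none => ([s], some t)
  | some m => if t > m then ([s], some t) else if t = m then (st.1 ++ [s], st.2) else st

def find_longest_string (strings : List String) : List String :=
  (strings.foldl pvAStep ([], none)).1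

-- ===== PORT B =====
def find_longest_string_alt (strings : List String) : List String :=
  match strings with
  | [] => []  -- Source B raises EmptyListException here; outside Pre_
  | _ =>
    let sums := strings.map pvOrdSum
    match PySem.List.max? sums (fun x => x) with
    | none => []
    | some m => ((strings.zip sums).filter (fun p => p.2 == m)).map Prod.fst

-- ===== PRECONDITION & SPEC =====
-- A raises EmptyListException on the empty list; that is the only input it raises on.
def Pre_find_longest_string (strings : List String) : Prop := strings ≠ []
instance (strings : List String) : Decidable (Pre_find_longest_string strings) := by
  unfold Pre_find_longest_string; infer_instance
def pvWitness_find_longest_string : List String := (["ab", "c"])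
def Spec_find_longest_string (strings : List String) (out : List String) : Prop := out = find_longest_string_alt strings
instance (strings : List String) (out : List String) : Decidable (Spec_find_longest_string strings out) := by unfold Spec_find_longest_string; infer_instance

-- ===== CLAIM (what is proved, stated in full; the proofs are below) =====
def Claim_equal_find_longest_string : Prop := ∀ (strings : List String), Dom_find_longest_string strings → Pre_find_longest_string strings → Spec_find_longest_string strings (find_longest_string strings)

-- ===== LEMMAS AND PROOFS =====

-- running maximum of ord-sums starting from M
def pvMaxFrom (M : Int) (l : List String) : Int :=
  l.foldl (fun m s => max m (pvOrdSum s)) M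

theorem pvMaxFrom_cons (M : Int) (s : String) (l : List String) :
    pvMaxFrom M (s :: l) = pvMaxFrom (max M (pvOrdSum s)) l := rfl

theorem le_pvMaxFrom (l : List String) (M : Int) : M ≤ pvMaxFrom M l := by
  induction l generalizing M with
  | nil => simp [pvMaxFrom]
  | cons s rest ih =>
    rw [pvMaxFrom_cons]
    exact le_trans (le_max_left _ _) (ih _)

theorem pvLoop_spec (l : List String) (acc : List String) (M : Int) :
    l.foldl pvAStep (acc, some M) =
      ((if pvMaxFrom M l = M then acc else []) ++
         l.filter (fun s => pvOrdSum s == pvMaxFrom M l),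
       some (pvMaxFrom M l)) := by
  induction l generalizing acc M with
  | nil => simp [pvMaxFrom]
  | cons s rest ih =>
    rw [List.foldl_cons, pvMaxFrom_cons]
    rcases lt_trichotomy (pvOrdSum s) M with hlt | heq | hgt
    · -- t < M : state unchanged
      have hstep : pvAStep (acc, some M) s = (acc, some M) := by
        simp only [pvAStep]
        rw [if_neg (by omega), if_neg (by omega)]
      rw [hstep, ih]
      have hmax : max M (pvOrdSum s) = M := by omega
      rw [hmax]
      have hne : ¬ (pvOrdSum s == pvMaxFrom M rest) = true := by
        have := le_pvMaxFrom rest M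
        simp only [beq_iff_eq]; omega
      simp [hne]
    · -- t = M : append
      have hstep : pvAStep (acc, some M) s = (acc ++ [s], some M) := by
        simp only [pvAStep]
        rw [if_neg (by omega), if_pos heq]
      rw [hstep, ih]
      have hmax : max M (pvOrdSum s) = M := by omega
      rw [hmax]
      by_cases hF : pvMaxFrom M rest = M
      · simp [hF, heq]
      · have hne : ¬ (pvOrdSum s == pvMaxFrom M rest) = true := by
          have := le_pvMaxFrom rest M
          simp only [beq_iff_eq]; omega
        simp [hne, hF]
    · -- t > M : reset
      have hstep : pvAStep (acc, some M) s = ([s], some (pvOrdSum s)) := by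
        simp only [pvAStep]
        rw [if_pos (by omega)]
      rw [hstep, ih]
      have hmax : max M (pvOrdSum s) = max (pvOrdSum s) M := by omega
      have hmax' : max M (pvOrdSum s) = pvOrdSum s := by omega
      rw [hmax']
      have hle := le_pvMaxFrom rest (pvOrdSum s)
      have hFM : ¬ pvMaxFrom (pvOrdSum s) rest = M := by omega
      by_cases hF : pvMaxFrom (pvOrdSum s) rest = pvOrdSum s
      · simp [hF]
        intro h; omega
      · have hne : ¬ (pvOrdSum s == pvMaxFrom (pvOrdSum s) rest) = true := by
          simp only [beq_iff_eq]; omega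
        simp [hne, hF, hFM]

theorem pvZipFilter (l : List String) (M : Int) :
    (((l.zip (l.map pvOrdSum)).filter (fun p => p.2 == M)).map Prod.fst) =
      l.filter (fun s => pvOrdSum s == M) := by
  induction l with
  | nil => rfl
  | cons s rest ih =>
    simp only [List.map_cons, List.zip_cons_cons, List.filter_cons]
    by_cases h : (pvOrdSum s == M) = true
    · simp [h, ih]
    · simp [h, ih]

-- ===== VERDICT (by name: the statement is the Claim_ definition above) =====
theorem find_longest_string_spec : Claim_equal_find_longest_string := by
  intro strings _ hpre
  unfold Spec_find_longest_string
  match strings with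
  | [] => exact absurd rfl hpre
  | s :: rest =>
    have hA : find_longest_string (s :: rest) =
        (if pvMaxFrom (pvOrdSum s) rest = pvOrdSum s then [s] else []) ++
          rest.filter (fun x => pvOrdSum x == pvMaxFrom (pvOrdSum s) rest) := by
      unfold find_longest_string
      rw [List.foldl_cons]
      have hstep : pvAStep ([], none) s = ([s], some (pvOrdSum s)) := rfl
      rw [hstep, pvLoop_spec]
    rw [hA]
    unfold find_longest_string_alt
    simp only [List.map_cons]
    rw [PySem.List.max?_id_cons, List.foldl_map]
    rw [show rest.foldl (fun x y => max x (pvOrdSum y)) (pvOrdSum s)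
          = pvMaxFrom (pvOrdSum s) rest from rfl]
    dsimp only
    rw [show pvOrdSum s :: rest.map pvOrdSum = (s :: rest).map pvOrdSum from rfl]
    rw [pvZipFilter]
    rw [List.filter_cons]
    by_cases h : pvMaxFrom (pvOrdSum s) rest = pvOrdSum s
    · simp [h]
    · have : ¬ (pvOrdSum s == pvMaxFrom (pvOrdSum s) rest) = true := by
        simp only [beq_iff_eq]; omega
      simp [this, h]
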